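-- pv_equiv track=rewrite | github.com/Richardxm2062/python | HW/others/滑动窗口.py | solve
-- ===== SOURCE A (Python) =====
-- def solve(instr, tarstr) :
--     instr = list(instr)
--     tarstr = list(tarstr)
--
--     left_pointer = 0
--     right_pointer = 1
--     res = [['0']]                                           #记录满足条件的最小区间
--     sl = slice(left_pointer,right_pointer)                  #切片操作
--     are = instr[sl]                 #当前指针区间
--     while True :
--         sl = slice(left_pointer,right_pointer)              #必须更新
--         are = instr[sl]
--         if tarstr[0] in are and tarstr[1] in are :          #当前区间存在字符串tar的字符
--             #更新解
--             if res[0] == ['0'] :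
--                 res[0] = are
--             if len(are) < len(res[0]) :
--                 res[0] = are
--             left_pointer += 1                               #左指针移动缩小区间
--
--         else :                                              #当前区间不存在所需的字符
--             right_pointer += 1                              #右指针移动扩大区间
--
--         if right_pointer > len(instr) :                    #越界
--             break
--
--     return res
-- ===== SOURCE B (Python) =====
-- def solve(instr, tarstr):
--     s = list(instr)
--     c1, c2 = tarstr[0], tarstr[1]
--     best = ['0']                        # same "no answer" convention as the original
--     cnt1 = cnt2 = 0
--     left = 0
--     for r in range(len(s)):
--         if s[r] == c1:
--             cnt1 += 1
--         if s[r] == c2: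
--             cnt2 += 1
--         while cnt1 > 0 and cnt2 > 0:    # window s[left:r+1] contains both targets
--             if best == ['0'] or r + 1 - left < len(best):
--                 best = s[left:r + 1]
--             if s[left] == c1:
--                 cnt1 -= 1
--             if s[left] == c2:
--                 cnt2 -= 1
--             left += 1
--     return [best]
-- ===== Notes on version B (the rewrite author's own statement) =====
-- stated objective: faster
-- what changed: A re-slices the string and re-scans the whole window for both target characters on every pointer move (O(n) work per step); B keeps running counts of the two target characters and moves the two pointers incrementally, one pass.
-- outside the precondition, e.g. on solve('abc', 'z'): A returns [['0']], B raises IndexError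
import Mathlib
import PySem

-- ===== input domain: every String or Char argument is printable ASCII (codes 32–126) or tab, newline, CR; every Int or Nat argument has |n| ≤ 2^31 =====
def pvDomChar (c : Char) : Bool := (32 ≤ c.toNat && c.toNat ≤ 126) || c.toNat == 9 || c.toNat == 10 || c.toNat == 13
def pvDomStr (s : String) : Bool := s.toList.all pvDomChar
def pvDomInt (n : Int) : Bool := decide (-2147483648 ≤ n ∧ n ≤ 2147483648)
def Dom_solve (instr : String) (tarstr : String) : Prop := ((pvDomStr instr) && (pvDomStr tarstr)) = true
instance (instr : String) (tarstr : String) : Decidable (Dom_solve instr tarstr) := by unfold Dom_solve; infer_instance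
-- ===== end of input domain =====

-- B replaces A's per-step window re-slicing and re-scanning by an incremental sliding window
-- with running counts of the two target characters (objective: faster, one pass).

-- ===== PORT A =====
-- the window instr[left:right] (slice with 0 ≤ left ≤ right, as in A)
def winA (cs : List String) (l r : Nat) : List String := (cs.drop l).take (r - l)

-- A's two-step update of res[0]: first the ['0'] sentinel, then the strict-length test
def updA (res0 are : List String) : List String :=
  let res1 := if res0 = ["0"] then are else res0
  if are.length < res1.length then are else res1

-- A's `while True` loop over (left_pointer, right_pointer, res[0]); the fuel only makes the
-- recursion total: 2*len+3 steps are never exhausted (each iteration moves one pointer forward)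
def loopA (cs : List String) (c1 c2 : String) : Nat → Nat → Nat → List String → List String
  | 0, _, _, res0 => res0
  | fuel+1, l, r, res0 =>
    let are := winA cs l r
    if c1 ∈ are ∧ c2 ∈ are then
      let res' := updA res0 are
      if r > cs.length then res' else loopA cs c1 c2 fuel (l+1) r res'
    else
      if r + 1 > cs.length then res0 else loopA cs c1 c2 fuel l (r+1) res0

def solve (instr : String) (tarstr : String) : List (List String) :=
  let cs := instr.toList.map Char.toString      -- list(instr): list of 1-char strings
  let ts := tarstr.toList.map Char.toString     -- list(tarstr)
  -- tarstr[0] / tarstr[1]: the IndexError for shorter targets is excluded by Pre_solve,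
  -- so the getD defaults are never reached on claimed inputs
  [loopA cs (ts.getD 0 "") (ts.getD 1 "") (2 * cs.length + 3) 0 1 ["0"]]

-- ===== PORT B =====
-- B's inner `while cnt1 > 0 and cnt2 > 0` shrink loop; the fuel r+1-l only makes it total
-- (left never passes r+1 in Python, since the counts of an empty window are 0).
-- Counts are Int as in Python; on reachable states l ≤ r+1, so Nat r+1-l matches Python's r+1-left.
def shrinkB (cs : List String) (c1 c2 : String) : Nat → Nat → Nat → Int → Int → List String → Nat × Int × Int × List String
  | 0, l, _, n1, n2, best => (l, n1, n2, best)
  | fuel+1, l, r, n1, n2, best =>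
    if n1 > 0 ∧ n2 > 0 then
      let best' := if best = ["0"] ∨ r + 1 - l < best.length then (cs.drop l).take (r + 1 - l) else best
      let n1' := if cs.getD l "" = c1 then n1 - 1 else n1   -- s[left]: in range while counts are positive
      let n2' := if cs.getD l "" = c2 then n2 - 1 else n2
      shrinkB cs c1 c2 fuel (l+1) r n1' n2' best'
    else (l, n1, n2, best)

-- one iteration of B's `for r in range(len(s))` body over state (left, cnt1, cnt2, best)
def stepB (cs : List String) (c1 c2 : String) (st : Nat × Int × Int × List String) (r : Nat) : Nat × Int × Int × List String :=
  let n1 := if cs.getD r "" = c1 then st.2.1 + 1 else st.2.1     -- s[r]: r < len(s)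
  let n2 := if cs.getD r "" = c2 then st.2.2.1 + 1 else st.2.2.1
  shrinkB cs c1 c2 (r + 1 - st.1) st.1 r n1 n2 st.2.2.2

def solve_alt (instr : String) (tarstr : String) : List (List String) :=
  let cs := instr.toList.map Char.toString
  let ts := tarstr.toList.map Char.toString
  [((List.range cs.length).foldl (stepB cs (ts.getD 0 "") (ts.getD 1 "")) (0, (0:Int), (0:Int), ["0"])).2.2.2]

-- ===== PRECONDITION & SPEC =====
-- Pre_ excludes targets shorter than 2 characters: there A raises IndexError at tarstr[0] or
-- tarstr[1] whenever tarstr is empty or its only character occurs in a window, and B's up-front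
-- unpacking of both target characters raises IndexError on all of them.
def Pre_solve (_instr : String) (tarstr : String) : Prop := 2 ≤ tarstr.toList.length
instance (instr : String) (tarstr : String) : Decidable (Pre_solve instr tarstr) := by unfold Pre_solve; infer_instance
def pvWitness_solve : String × String := ("abcb", "bc")

def Spec_solve (instr : String) (tarstr : String) (out : List (List String)) : Prop := out = solve_alt instr tarstr
instance (instr : String) (tarstr : String) (out : List (List String)) : Decidable (Spec_solve instr tarstr out) := by unfold Spec_solve; infer_instance

-- ===== CLAIM (what is proved, stated in full; the proofs are below) =====
def Claim_equal_solve : Prop := ∀ (instr : String) (tarstr : String), Dom_solve instr tarstr → Pre_solve instr tarstr → Spec_solve instr tarstr (solve instr tarstr)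

-- ===== LEMMAS AND PROOFS =====

lemma winA_length (cs : List String) (l r : Nat) (h : r ≤ cs.length) :
    (winA cs l r).length = r - l := by
  simp [winA]; omega

lemma winA_cons (cs : List String) (l r : Nat) (hlr : l < r) (hl : l < cs.length) :
    winA cs l r = cs.getD l "" :: winA cs (l+1) r := by
  unfold winA
  rw [List.drop_eq_getElem_cons hl]
  rw [show r - l = (r - (l+1)) + 1 by omega]
  rw [List.take_succ_cons]
  rw [List.getD_eq_getElem cs _ hl]

lemma winA_snoc (cs : List String) (l r : Nat) (hlr : l ≤ r) (hr : r < cs.length) :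
    winA cs l (r+1) = winA cs l r ++ [cs.getD r ""] := by
  unfold winA
  rw [show r + 1 - l = (r - l) + 1 by omega, List.take_add_one]
  congr 1
  have h : r - l < (cs.drop l).length := by rw [List.length_drop]; omega
  rw [List.getElem?_eq_getElem h]
  simp only [List.getElem_drop, Option.toList_some]
  rw [List.getD_eq_getElem cs _ hr]
  congr 2; omega

lemma updA_eq (res0 are : List String) :
    updA res0 are = if res0 = ["0"] ∨ are.length < res0.length then are else res0 := by
  unfold updA
  split_ifs <;> simp_all

lemma shrinkB_stop (cs : List String) (c1 c2 : String) (fuel l r : Nat) (n1 n2 : Int)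
    (best : List String) (h : ¬ (n1 > 0 ∧ n2 > 0)) :
    shrinkB cs c1 c2 fuel l r n1 n2 best = (l, n1, n2, best) := by
  cases fuel <;> simp [shrinkB, h]

lemma main (cs : List String) (c1 c2 : String) (fuel : Nat) :
    ∀ (l r : Nat) (n1 n2 : Int) (res0 : List String),
    1 ≤ r → r ≤ cs.length → l ≤ r →
    2 * cs.length + 2 ≤ fuel + l + r →
    n1 = ((winA cs l r).count c1 : Int) → n2 = ((winA cs l r).count c2 : Int) →
    loopA cs c1 c2 fuel l r res0 =
      ((List.range' r (cs.length - r)).foldl (stepB cs c1 c2)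
        (shrinkB cs c1 c2 (r - l) l (r - 1) n1 n2 res0)).2.2.2 := by
  induction fuel with
  | zero =>
    intro l r n1 n2 res0 h1 hr hlr hf hn1 hn2
    omega
  | succ fuel ih =>
    intro l r n1 n2 res0 h1 hr hlr hf hn1 hn2
    simp only [loopA]
    by_cases hv : c1 ∈ winA cs l r ∧ c2 ∈ winA cs l r
    · -- valid window: both sides shrink by one
      have hpos1 : 0 < (winA cs l r).count c1 := List.count_pos_iff.mpr hv.1
      have hpos2 : 0 < (winA cs l r).count c2 := List.count_pos_iff.mpr hv.2
      have hlen : (winA cs l r).length = r - l := winA_length cs l r hr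
      have hlr' : l < r := by
        have := List.count_le_length (l := winA cs l r) (a := c1); omega
      have hl : l < cs.length := by omega
      have hwin := winA_cons cs l r hlr' hl
      rw [if_pos hv, if_neg (by omega : ¬ r > cs.length)]
      rw [show r - l = (r - (l+1)) + 1 by omega, shrinkB]
      rw [if_pos ⟨by rw [hn1]; exact_mod_cast hpos1, by rw [hn2]; exact_mod_cast hpos2⟩]
      have harew : (cs.drop l).take (r - 1 + 1 - l) = winA cs l r := by
        unfold winA; rw [show r - 1 + 1 - l = r - l by omega]
      rw [harew, show r - 1 + 1 - l = r - l by omega]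
      rw [show (if res0 = ["0"] ∨ r - l < res0.length then winA cs l r else res0)
            = updA res0 (winA cs l r) by rw [updA_eq, hlen]]
      apply ih (l+1) r _ _ _ h1 hr (by omega) (by omega)
      · rw [hn1, hwin, List.count_cons]
        by_cases hc : cs.getD l "" = c1
        · rw [if_pos hc, if_pos (beq_iff_eq.mpr hc)]; push_cast; omega
        · rw [if_neg hc, if_neg (by simpa using hc)]; push_cast; omega
      · rw [hn2, hwin, List.count_cons]
        by_cases hc : cs.getD l "" = c2
        · rw [if_pos hc, if_pos (beq_iff_eq.mpr hc)]; push_cast; omega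
        · rw [if_neg hc, if_neg (by simpa using hc)]; push_cast; omega
    · -- invalid window: A grows right, B moves to the next outer index
      have hc : ¬ (n1 > 0 ∧ n2 > 0) := by
        rintro ⟨p1, p2⟩
        exact hv ⟨List.count_pos_iff.mp (by rw [hn1] at p1; exact_mod_cast p1),
                  List.count_pos_iff.mp (by rw [hn2] at p2; exact_mod_cast p2)⟩
      rw [if_neg hv, shrinkB_stop cs c1 c2 _ _ _ _ _ _ hc]
      by_cases hrn : r = cs.length
      · rw [if_pos (by omega : r + 1 > cs.length)]
        simp [hrn]
      · have hrlt : r < cs.length := by omega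
        rw [if_neg (by omega : ¬ r + 1 > cs.length)]
        rw [show cs.length - r = (cs.length - (r+1)) + 1 by omega, List.range'_succ,
            List.foldl_cons]
        have hstep : stepB cs c1 c2 (l, n1, n2, res0) r =
            shrinkB cs c1 c2 (r + 1 - l) l r
              (if cs.getD r "" = c1 then n1 + 1 else n1)
              (if cs.getD r "" = c2 then n2 + 1 else n2) res0 := rfl
        rw [hstep]
        have hsnoc := winA_snoc cs l r hlr hrlt
        have h2 := ih l (r+1) (if cs.getD r "" = c1 then n1 + 1 else n1)
            (if cs.getD r "" = c2 then n2 + 1 else n2) res0 (by omega) (by omega) (by omega)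
            (by omega) ?_ ?_
        · rw [show r + 1 - l = (r+1) - l by rfl] at *
          rw [h2]
          rw [show r + 1 - 1 = r by omega]
        · rw [hn1, hsnoc, List.count_append, List.count_cons, List.count_nil]
          by_cases hc1 : cs.getD r "" = c1
          · rw [if_pos hc1, if_pos (beq_iff_eq.mpr hc1)]; push_cast; omega
          · rw [if_neg hc1, if_neg (by simpa using hc1)]; push_cast; omega
        · rw [hn2, hsnoc, List.count_append, List.count_cons, List.count_nil]
          by_cases hc2 : cs.getD r "" = c2
          · rw [if_pos hc2, if_pos (beq_iff_eq.mpr hc2)]; push_cast; omega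
          · rw [if_neg hc2, if_neg (by simpa using hc2)]; push_cast; omega

-- ===== VERDICT (by name: the statement is the Claim_ definition above) =====
theorem solve_spec : Claim_equal_solve := by
  intro instr tarstr _ _
  unfold Spec_solve solve solve_alt
  simp only []
  set cs := instr.toList.map Char.toString with hcs
  set c1 := (tarstr.toList.map Char.toString).getD 0 "" with hc1
  set c2 := (tarstr.toList.map Char.toString).getD 1 "" with hc2
  by_cases hn0 : cs.length = 0
  · have hnil : cs = [] := List.eq_nil_of_length_eq_zero hn0
    rw [hnil]
    simp [loopA, winA]
  · have h1 : 1 ≤ cs.length := by omega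
    have hwin01 : winA cs 0 1 = [cs.getD 0 ""] := by
      rw [winA_cons cs 0 1 (by omega) (by omega)]
      simp [winA]
    have key := main cs c1 c2 (2*cs.length+3) 0 1
        (if cs.getD 0 "" = c1 then (1:Int) else 0) (if cs.getD 0 "" = c2 then (1:Int) else 0)
        ["0"] le_rfl h1 (by omega) (by omega) ?_ ?_
    · rw [key, List.range_eq_range', show cs.length = (cs.length - 1) + 1 by omega,
          List.range'_succ, List.foldl_cons]
      congr 2
    · rw [hwin01, List.count_cons, List.count_nil]
      by_cases hc : cs.getD 0 "" = c1
      · rw [if_pos hc, if_pos (beq_iff_eq.mpr hc)]; norm_num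
      · rw [if_neg hc, if_neg (by simpa using hc)]; norm_num
    · rw [hwin01, List.count_cons, List.count_nil]
      by_cases hc : cs.getD 0 "" = c2
      · rw [if_pos hc, if_pos (beq_iff_eq.mpr hc)]; norm_num
      · rw [if_neg hc, if_neg (by simpa using hc)]; norm_num
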